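-- pv_equiv track=rewrite | github.com/pypi-data/pypi-mirror-306 | packages/go-inspector/go_inspector-0.5.0-py3-none-any.whl/go_inspector/utils.py | escape_path
-- ===== SOURCE A (Python) =====
-- def escape_path(path: str) -> str:
--     """
--     Return an case-encoded module path or version name.
--
--     This is done by replacing every uppercase letter with an exclamation mark followed by the
--     corresponding lower-case letter, in order to avoid ambiguity when serving from case-insensitive
--     file systems.
--
--     See https://golang.org/ref/mod#goproxy-protocol.
--     """
--     escaped_path = ""
--     for c in path:
--         if c >= "A" and c <= "Z":
--             # replace uppercase with !lowercase
--             escaped_path += "!" + chr(ord(c) + ord("a") - ord("A"))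
--         else:
--             escaped_path += c
--     return escaped_path
-- ===== SOURCE B (Python) =====
-- def escape_path(path: str) -> str:
--     # Copy maximal runs without uppercase letters wholesale via slicing;
--     # only uppercase positions emit "!" + lowercase.
--     parts = []
--     start = 0
--     for i, c in enumerate(path):
--         if "A" <= c <= "Z":
--             parts.append(path[start:i])
--             parts.append("!" + c.lower())
--             start = i + 1
--     parts.append(path[start:])
--     return "".join(parts)
-- ===== Notes on version B (the rewrite author's own statement) =====
-- stated objective: alternative
-- what changed: Instead of appending character by character with an if/else, B scans for uppercase positions, copies the unchanged stretches between them wholesale as slices plus per-uppercase escape pieces into a parts list, and joins the parts once at the end.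
import Mathlib
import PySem

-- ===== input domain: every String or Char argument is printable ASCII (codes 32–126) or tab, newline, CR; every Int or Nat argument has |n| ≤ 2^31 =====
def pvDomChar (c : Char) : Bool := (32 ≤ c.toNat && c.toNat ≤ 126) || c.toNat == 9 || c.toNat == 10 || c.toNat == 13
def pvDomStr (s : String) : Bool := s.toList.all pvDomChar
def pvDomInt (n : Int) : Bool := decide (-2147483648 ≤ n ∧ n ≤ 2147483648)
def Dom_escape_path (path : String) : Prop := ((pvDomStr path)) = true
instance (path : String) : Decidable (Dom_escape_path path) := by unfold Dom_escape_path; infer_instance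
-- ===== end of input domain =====

-- B replaces A's per-character append loop by a run-based construction: it scans for
-- uppercase positions and copies the unchanged stretches between them wholesale as slices,
-- joining the pieces at the end (alternative decomposition; same O(n) result).

-- ===== PORT A =====
-- loop body of A: uppercase becomes "!" ++ lowercase, everything else is appended as is
def pvStepA (acc : String) (c : Char) : String :=
  if 'A' ≤ c ∧ c ≤ 'Z' then acc ++ "!" ++ String.singleton (Char.ofNat (c.toNat + 97 - 65))
  else acc.push c

def escape_path (path : String) : String :=
  path.toList.foldl pvStepA ""

-- ===== PORT B =====
-- loop body of B: state (parts, start); at an uppercase position i, append the slice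
-- path[start:i] and "!" + c.lower() to parts and set start = i + 1
def pvStepB (path : String) (st : List String × Int) (p : Int × Char) : List String × Int :=
  if 'A' ≤ p.2 ∧ p.2 ≤ 'Z' then
    (st.1 ++ [PySem.Str.slice path (some st.2) (some p.1),
              "!" ++ PySem.Str.lower (String.singleton p.2)], p.1 + 1)
  else st

def escape_path_alt (path : String) : String :=
  let r := (PySem.List.enumerate path.toList 0).foldl (pvStepB path) ([], 0)
  PySem.Str.join "" (r.1 ++ [PySem.Str.slice path (some r.2) none])

-- ===== PRECONDITION & SPEC =====
def Spec_escape_path (path : String) (out : String) : Prop := out = escape_path_alt path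
instance (path : String) (out : String) : Decidable (Spec_escape_path path out) := by unfold Spec_escape_path; infer_instance

-- ===== CLAIM (what is proved, stated in full; the proofs are below) =====
def Claim_equal_escape_path : Prop := ∀ (path : String), Dom_escape_path path → Spec_escape_path path (escape_path path)

-- ===== LEMMAS AND PROOFS =====

-- the per-character output both programs produce, as a list of chars
def pvF (c : Char) : List Char :=
  if 'A' ≤ c ∧ c ≤ 'Z' then ['!', Char.ofNat (c.toNat + 97 - 65)] else [c]

lemma pv_lowerChar (c : Char) (h : 'A' ≤ c ∧ c ≤ 'Z') :
    PySem.Chars.lowerChar c = Char.ofNat (c.toNat + 97 - 65) := by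
  simp only [PySem.Chars.lowerChar, PySem.Chars.isupper]
  rw [show c.toNat + 97 - 65 = c.toNat + 32 from by omega, if_pos (by simp [h.1, h.2])]

lemma pv_join_nil_flatten (l : List (List Char)) : PySem.Chars.join [] l = l.flatten := by
  induction l with
  | nil => simp
  | cons a l ih =>
    cases l with
    | nil => simp [PySem.Chars.join_singleton]
    | cons b m => rw [PySem.Chars.join_cons_cons]; simp_all

lemma pv_flatMap_id (l : List Char) (h : ∀ c ∈ l, ¬('A' ≤ c ∧ c ≤ 'Z')) :
    l.flatMap pvF = l := by
  induction l with
  | nil => simp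
  | cons c l ih =>
    simp only [List.flatMap_cons]
    rw [pvF, if_neg (h c (by simp)), ih (fun c hc => h c (by simp [hc]))]
    simp

lemma pv_push_eq (s : String) (c : Char) : s.push c = s ++ String.singleton c := by
  apply String.ext
  simp [String.singleton]

-- A's loop produces the concatenation of the per-character pieces
lemma pv_a_flat (l : List Char) (acc : String) :
    (l.foldl pvStepA acc).toList = acc.toList ++ l.flatMap pvF := by
  induction l generalizing acc with
  | nil => simp
  | cons c l ih =>
    simp only [List.foldl_cons, List.flatMap_cons, ih, pvStepA, pvF]
    split
    · simp [String.singleton]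
    · rw [pv_push_eq]
      simp [String.singleton]

-- B's loop invariant: joining the accumulated parts plus the pending slice from `start`
-- yields the already-emitted output plus the per-character pieces of the rest from `start`,
-- provided path[start:k] contains no uppercase letter
lemma pv_b_inv (path : String) (suf : List Char) :
    ∀ (k st : Nat) (P : List String), st ≤ k → path.toList.drop k = suf →
    (∀ c ∈ (path.toList.drop st).take (k - st), ¬('A' ≤ c ∧ c ≤ 'Z')) →
    ((((PySem.List.enumerate suf (k : Int)).foldl (pvStepB path) (P, (st : Int))).1
        ++ [PySem.Str.slice path
             (some ((PySem.List.enumerate suf (k : Int)).foldl (pvStepB path) (P, (st : Int))).2)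
             none]).map String.toList).flatten
      = (P.map String.toList).flatten ++ (path.toList.drop st).flatMap pvF := by
  induction suf with
  | nil =>
    intro k st P hst hk hmid
    simp only [PySem.List.enumerate_nil, List.foldl_nil]
    have hlen : path.toList.length ≤ k := List.drop_eq_nil_iff.mp hk
    have hall : (path.toList.drop st).take (k - st) = path.toList.drop st :=
      List.take_of_length_le (by rw [List.length_drop]; omega)
    have hmid' : ∀ c ∈ path.toList.drop st, ¬('A' ≤ c ∧ c ≤ 'Z') :=
      fun c hc => hmid c (by rw [hall]; exact hc)
    rw [pv_flatMap_id _ hmid']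
    simp [PySem.Str.toList_slice, PySem.List.slice_from_natCast]
  | cons c suf ih =>
    intro k st P hst hk hmid
    have hdrop1 : path.toList.drop (k + 1) = suf := by
      rw [← List.drop_drop, hk]  -- drop 1 (drop k) ; orientation checked below
      simp
    have hget : path.toList.drop k = c :: suf := hk
    have hklt : k < path.toList.length := by
      by_contra h
      rw [List.drop_eq_nil_iff.mpr (by omega)] at hk
      exact absurd hk (by simp)
    have hmidlen : ((path.toList.drop st).take (k - st)).length = k - st := by
      rw [List.length_take, List.length_drop]
      omega
    have hsplit : path.toList.drop st
        = (path.toList.drop st).take (k - st) ++ c :: path.toList.drop (k + 1) := by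
      conv_lhs => rw [← List.take_append_drop (k - st) (path.toList.drop st)]
      congr 1
      rw [List.drop_drop, show st + (k - st) = k from by omega, hk, hdrop1]
    rw [PySem.List.enumerate_cons, List.foldl_cons]
    by_cases hc : 'A' ≤ c ∧ c ≤ 'Z'
    · rw [pvStepB, if_pos hc]
      have hcast : ((k : Int) + 1) = ((k + 1 : Nat) : Int) := by push_cast; ring
      simp only [hcast]
      rw [ih (k + 1) (k + 1) _ (le_refl _) hdrop1 (by simp)]
      rw [hsplit, List.flatMap_append, List.flatMap_cons,
          pv_flatMap_id _ hmid]
      have hslice : (PySem.Str.slice path (some (st : Int)) (some (k : Int))).toList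
          = (path.toList.drop st).take (k - st) := by
        simp [PySem.Str.toList_slice, PySem.List.slice_natCast]
      have hbang : ("!" ++ PySem.Str.lower (String.singleton c)).toList = pvF c := by
        have : (String.singleton c).toList = [c] := by simp [String.singleton]
        simp [PySem.Str.toList_lower, PySem.Chars.lower, this, pvF, if_pos hc,
              pv_lowerChar c hc]
      simp only [List.map_append, List.flatten_append, List.map_cons, List.map_nil,
        List.flatten_cons, List.flatten_nil, hslice, hbang]
      simp
    · rw [pvStepB, if_neg hc]
      have hcast : ((k : Int) + 1) = ((k + 1 : Nat) : Int) := by push_cast; ring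
      simp only [hcast]
      refine ih (k + 1) st P (by omega) hdrop1 ?_
      intro d hd
      have htake : (path.toList.drop st).take (k + 1 - st)
          = (path.toList.drop st).take (k - st) ++ [c] := by
        conv_lhs => rw [hsplit]
        rw [show k + 1 - st = ((path.toList.drop st).take (k - st)).length + 1 from by
              rw [hmidlen]; omega,
            List.take_length_add_append]
        simp
      rw [htake] at hd
      rcases List.mem_append.mp hd with h | h
      · exact hmid d h
      · simp at h; subst h; exact hc

-- ===== VERDICT (by name: the statement is the Claim_ definition above) =====
theorem escape_path_spec : Claim_equal_escape_path := by
  intro path _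
  unfold Spec_escape_path escape_path escape_path_alt
  apply String.toList_inj.mp
  have hA := pv_a_flat path.toList ""
  have hB := pv_b_inv path path.toList 0 0 [] (le_refl _) (by simp) (by simp)
  simp only [List.drop_zero, List.map_nil, List.flatten_nil, List.nil_append,
    Nat.cast_zero] at hB
  have he : ("" : String).toList = [] := by simp
  rw [hA, PySem.Str.toList_join, he, pv_join_nil_flatten]
  simpa using hB.symm
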